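-- pv_equiv track=rewrite | github.com/Moussa-Mikhail/ComplexFraction | complex_fraction.py | split_complex_str
-- ===== SOURCE A (Python) =====
-- from typing import Tuple, Union
--
-- def split_complex_str(z_str: str) -> Tuple[str, str]:
--
--     """Takes a string representing a complex number \n
--     and returns a tuple of strings which are \n
--     representations of the real and imaginary parts.
--
--     Examples
--     --------
--
--     split_complex_str("1.1") = ("1.1", "0")
--
--     split_complex_str("1.1j") = ("0", "1.1")
--
--     split_complex_str("1/3*1j") = ("0", "1/3")
--
--     split_complex_str("1+1j") = ("1", "1")
--
--     split_complex_str("1/3+1.2j") = ("1/3", "1.2")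
--
--     split_complex_str("1.2j+1/3") = ("1/3", "1.2")
--
--     split_complex_str("1.2-1/3*1j") = ("1.2", "-1/3")
--
--     split_complex_str("-1/3*1j+1.2") = ("1.2", "-1/3")
--
--     """
--
--     real_str: str = ""
--
--     imag_str: str = ""
--
--     if "j" in z_str:
--
--         curr_pos: int = z_str.find("j")
--
--         curr_char: str = z_str[curr_pos]
--
--         imag_str = "j"
--
--         while curr_pos > 0 and curr_char not in {"+", "-"}:
--
--             curr_pos -= 1
--
--             curr_char = z_str[curr_pos]
--
--             imag_str = curr_char + imag_str
--
--         real_str = z_str.replace(imag_str, "")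
--
--         real_str = real_str.replace("+", "")
--
--         imag_str = imag_str.replace("*1j", "")
--
--         imag_str = imag_str.replace("j", "")
--
--         imag_str = imag_str.replace("+", "")
--
--         if real_str == "":
--
--             real_str = "0"
--
--     else:
--
--         real_str = z_str
--
--         real_str = real_str.replace("+", "")
--
--         imag_str = "0"
--
--     return real_str, imag_str
-- ===== SOURCE B (Python) =====
-- def split_complex_str(z_str):
--     """Idiomatic rewrite: locate the imaginary segment by one forward scan for the
--     last sign before the first 'j' and slice it out, instead of building it
--     backwards character by character."""
--     j = z_str.find("j")
--     if j == -1: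
--         return z_str.replace("+", ""), "0"
--     start = 0
--     for k in range(j):
--         if z_str[k] in "+-":
--             start = k
--     seg = z_str[start:j + 1]
--     real_str = z_str.replace(seg, "").replace("+", "")
--     imag_str = seg.replace("*1j", "").replace("j", "").replace("+", "")
--     return (real_str or "0"), imag_str
-- ===== Notes on version B (the rewrite author's own statement) =====
-- stated objective: idiomatic
-- what changed: A's backward character-by-character while loop that builds the imaginary segment by string concatenation is replaced by a single forward scan recording the last sign position before the first letter j, followed by one slice; the replace-based cleaning chain is kept.
import Mathlib
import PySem

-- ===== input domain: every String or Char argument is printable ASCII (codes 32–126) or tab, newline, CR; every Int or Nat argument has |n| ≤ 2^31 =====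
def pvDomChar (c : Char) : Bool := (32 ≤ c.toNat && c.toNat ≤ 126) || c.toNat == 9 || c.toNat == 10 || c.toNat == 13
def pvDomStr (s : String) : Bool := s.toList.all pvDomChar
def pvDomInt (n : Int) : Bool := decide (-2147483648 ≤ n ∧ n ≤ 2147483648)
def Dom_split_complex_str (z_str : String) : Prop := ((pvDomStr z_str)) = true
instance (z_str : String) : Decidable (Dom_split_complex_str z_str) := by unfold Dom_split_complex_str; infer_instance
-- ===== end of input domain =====

-- B replaces A's backward character-by-character while loop (string concatenation) by one
-- forward scan for the last sign before the first 'j' plus a slice; same replace-cleaning chain.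


-- ===== PORT A =====
-- A's backward while loop: while curr_pos > 0 and curr_char not in {'+','-'}:
--   curr_pos -= 1; curr_char = z[curr_pos]; imag = curr_char + imag
-- (index is always in range here, so z.getD pos ' ' is exact for z_str[curr_pos])
def pvALoop (z : List Char) : Nat → Char → List Char → List Char
  | 0, _, imag => imag
  | pos + 1, c, imag =>
      if c = '+' ∨ c = '-' then imag
      else
        let c' := z.getD pos ' '
        pvALoop z pos c' (c' :: imag)

def split_complex_str (z_str : String) : String × String :=
  let z := z_str.toList
  if PySem.Chars.isIn ['j'] z then
    let currPos : Nat := (PySem.Chars.find z ['j']).toNat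
    let currChar : Char := z.getD currPos ' '      -- z_str[curr_pos]; in range since 'j' was found
    let imag1 := pvALoop z currPos currChar ['j']
    let real1 := PySem.Chars.replace (PySem.Chars.replace z imag1 []) ['+'] []
    let imag2 := PySem.Chars.replace (PySem.Chars.replace (PySem.Chars.replace imag1 ['*','1','j'] []) ['j'] []) ['+'] []
    ((if real1 = [] then "0" else String.ofList real1), String.ofList imag2)
  else
    (String.ofList (PySem.Chars.replace z_str.toList ['+'] []), "0")

-- ===== PORT B =====
-- B's forward scan: start = 0; for k in range(j): if z[k] == '+' or z[k] == '-': start = k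
def pvLastSign (z : List Char) (j : Nat) : Nat :=
  (List.range j).foldl (fun start k => if z.getD k ' ' = '+' ∨ z.getD k ' ' = '-' then k else start) 0

def split_complex_str_alt (z_str : String) : String × String :=
  let z := z_str.toList
  let j := PySem.Chars.find z ['j']
  if j = -1 then
    (String.ofList (PySem.Chars.replace z ['+'] []), "0")
  else
    let start := pvLastSign z j.toNat
    let seg := PySem.List.slice z (some (start : Int)) (some (j + 1))   -- z_str[start:j+1]
    let real_str := PySem.Chars.replace (PySem.Chars.replace z seg []) ['+'] []
    let imag_str := PySem.Chars.replace (PySem.Chars.replace (PySem.Chars.replace seg ['*','1','j'] []) ['j'] []) ['+'] []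
    ((if real_str = [] then "0" else String.ofList real_str), String.ofList imag_str)

-- ===== PRECONDITION & SPEC =====
def Spec_split_complex_str (z_str : String) (out : String × String) : Prop := out = split_complex_str_alt z_str
instance (z_str : String) (out : String × String) : Decidable (Spec_split_complex_str z_str out) := by unfold Spec_split_complex_str; infer_instance

-- ===== CLAIM (what is proved, stated in full; the proofs are below) =====
def Claim_equal_split_complex_str : Prop := ∀ (z_str : String), Dom_split_complex_str z_str → Spec_split_complex_str z_str (split_complex_str z_str)

-- ===== LEMMAS AND PROOFS =====

-- the stop position of A's backward walk, as a recursion (proof-only helper)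
def pvBStop (z : List Char) : Nat → Nat
  | 0 => 0
  | pos + 1 => if z.getD (pos + 1) ' ' = '+' ∨ z.getD (pos + 1) ' ' = '-' then pos + 1 else pvBStop z pos

-- A's loop computes the segment z[pvBStop z pos .. j]
theorem pvALoop_eq (z : List Char) (j : Nat) (hj : j < z.length) :
    ∀ pos, pos ≤ j →
      pvALoop z pos (z.getD pos ' ') ((z.drop pos).take (j + 1 - pos)) =
        (z.drop (pvBStop z pos)).take (j + 1 - pvBStop z pos) := by
  intro pos
  induction pos with
  | zero => intro _; simp [pvALoop, pvBStop]
  | succ p ih =>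
    intro hpj
    simp only [pvALoop, pvBStop, List.getD]
    by_cases hs : z[p + 1]?.getD ' ' = '+' ∨ z[p + 1]?.getD ' ' = '-'
    · simp only [if_pos hs]
    · simp only [if_neg hs]
      have hdrop : z.drop p = z[p]?.getD ' ' :: z.drop (p + 1) := by
        have hp : p < z.length := by omega
        rw [List.getElem?_eq_getElem hp]
        exact (List.drop_eq_getElem_cons hp)
      have hseg : z[p]?.getD ' ' :: (z.drop (p + 1)).take (j + 1 - (p + 1)) =
          (z.drop p).take (j + 1 - p) := by
        rw [hdrop]
        have : j + 1 - p = (j + 1 - (p + 1)) + 1 := by omega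
        rw [this, List.take_succ_cons]
      rw [hseg]
      exact ih (by omega)

-- B's forward scan equals A's backward stop, whenever the scan's end index is not a sign
theorem pvLastSign_eq (z : List Char) :
    ∀ j, ¬ (z.getD j ' ' = '+' ∨ z.getD j ' ' = '-') → pvLastSign z j = pvBStop z j := by
  intro j
  induction j with
  | zero => intro _; simp [pvLastSign, pvBStop]
  | succ p ih =>
    intro hj
    simp only [List.getD] at hj ih ⊢
    have hfold : pvLastSign z (p + 1) =
        (if z[p]?.getD ' ' = '+' ∨ z[p]?.getD ' ' = '-' then p else pvLastSign z p) := by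
      simp [pvLastSign, List.range_succ, List.getD]
    rw [hfold]
    simp only [pvBStop, List.getD, if_neg hj]
    by_cases hp : z[p]?.getD ' ' = '+' ∨ z[p]?.getD ' ' = '-'
    · rw [if_pos hp]
      cases p with
      | zero => simp [pvBStop]
      | succ q => simp only [pvBStop, List.getD, if_pos hp]
    · rw [if_neg hp]
      exact ih hp

theorem split_complex_str_eq (z_str : String) :
    split_complex_str z_str = split_complex_str_alt z_str := by
  unfold split_complex_str split_complex_str_alt
  by_cases h : PySem.Chars.isIn ['j'] z_str.toList = true
  · have hinf : ['j'] <:+: z_str.toList := (PySem.Chars.isIn_iff_infix _ _).mp h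
    have hnn : 0 ≤ PySem.Chars.find z_str.toList ['j'] :=
      (PySem.Chars.find_nonneg_iff _ _).mpr hinf
    have hne : ¬ (PySem.Chars.find z_str.toList ['j'] = -1) := by omega
    set z := z_str.toList with hz
    set jN : Nat := (PySem.Chars.find z ['j']).toNat with hjN
    have hspec := PySem.Chars.find_spec hnn
    have hpre : ['j'] <+: z.drop jN := hspec.1
    have hlt : jN < z.length := by
      rcases hpre with ⟨t, ht⟩
      have : (z.drop jN).length = 1 + t.length := by rw [← ht]; simp; omega
      have hd : (z.drop jN).length = z.length - jN := by simp
      omega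
    have hgetj : z.getD jN ' ' = 'j' := by
      rcases hpre with ⟨t, ht⟩
      have hd : z.drop jN = 'j' :: t := ht.symm
      rw [List.getD_eq_getElem z ' ' hlt]
      have := List.drop_eq_getElem_cons hlt
      rw [hd] at this
      exact (List.cons.injEq _ _ _ _ ▸ this.symm) |>.1
    have hnotsign : ¬ (z.getD jN ' ' = '+' ∨ z.getD jN ' ' = '-') := by
      rw [hgetj]; decide
    -- A's imag segment equals B's slice
    have hjcast : PySem.Chars.find z ['j'] = (jN : Int) := by omega
    have hslice : PySem.List.slice z (some ((pvLastSign z jN : Nat) : Int))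
        (some (PySem.Chars.find z ['j'] + 1)) =
        (z.drop (pvBStop z jN)).take (jN + 1 - pvBStop z jN) := by
      rw [hjcast]
      have : ((jN : Int) + 1) = ((jN + 1 : Nat) : Int) := by push_cast; ring
      rw [this, PySem.List.slice_natCast, pvLastSign_eq z jN hnotsign]
    have hstart : pvALoop z jN (z.getD jN ' ') ['j'] =
        (z.drop (pvBStop z jN)).take (jN + 1 - pvBStop z jN) := by
      have hinit : ((z.drop jN).take (jN + 1 - jN)) = ['j'] := by
        rcases hpre with ⟨t, ht⟩
        rw [← ht]
        simp
      rw [← hinit]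
      exact pvALoop_eq z jN hlt jN le_rfl
    simp only [h, if_true, if_neg hne]
    rw [hstart, ← hslice]
  · have hninf : ¬ (['j'] <:+: z_str.toList) := by
      intro hc
      exact h ((PySem.Chars.isIn_iff_infix _ _).mpr hc)
    have heq : PySem.Chars.find z_str.toList ['j'] = -1 :=
      (PySem.Chars.find_eq_neg_one_iff _ _).mpr hninf
    simp [h, heq]

-- ===== VERDICT (by name: the statement is the Claim_ definition above) =====
theorem split_complex_str_spec : Claim_equal_split_complex_str := by
  intro z_str _
  unfold Spec_split_complex_str
  exact split_complex_str_eq z_str
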